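-- pv_equiv track=rewrite | github.com/gallexis/nsd-projet-2 | absolute_efficiency.py | max_degree_node_somme
-- ===== SOURCE A (Python) =====
-- def max_degree_node_somme(average_degree_exist,number_node):
--     comp=0
--     sum_node_degree=[]
--     if number_node > len(average_degree_exist) or number_node==0:
--         number_node=len(average_degree_exist)
--
--     while comp < number_node:
--         line = average_degree_exist[comp]
--         node1=line[0]
--         degree = line[1]
--         compte=comp+1
--         while compte < number_node:
--             line2 = average_degree_exist[compte]
--             degree2 = line2[1]
--             node2=line2[0]
--             nodes=[]
--             sum=degree+degree2
--             nodes.append((node1,node2))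
--             sum_node_degree.append(((node1,node2), sum))
--             compte+=1
--         comp+=1
--
--     return list(reversed(sorted(sum_node_degree, key=lambda tup: tup[1])))
-- ===== SOURCE B (Python) =====
-- def max_degree_node_somme(average_degree_exist, number_node):
--     n = len(average_degree_exist)
--     if number_node > n or number_node == 0:
--         number_node = n
--     buckets = {}
--     for comp in range(0, number_node):
--         node1, degree = average_degree_exist[comp]
--         for compte in range(comp + 1, number_node):
--             node2, degree2 = average_degree_exist[compte]
--             s = degree + degree2
--             buckets.setdefault(s, []).append(((node1, node2), s))
--     out = []
--     for s in sorted(buckets, reverse=True):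
--         out.extend(reversed(buckets[s]))
--     return out
-- ===== Notes on version B (the rewrite author's own statement) =====
-- stated objective: alternative
-- what changed: Replaces the flat pair list + comparison sort + reverse with a bucket table keyed by degree sum (built during the same pair enumeration) that is then emitted by iterating the distinct sums in descending order with each bucket reversed, reproducing the exact tie order.
import Mathlib
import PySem

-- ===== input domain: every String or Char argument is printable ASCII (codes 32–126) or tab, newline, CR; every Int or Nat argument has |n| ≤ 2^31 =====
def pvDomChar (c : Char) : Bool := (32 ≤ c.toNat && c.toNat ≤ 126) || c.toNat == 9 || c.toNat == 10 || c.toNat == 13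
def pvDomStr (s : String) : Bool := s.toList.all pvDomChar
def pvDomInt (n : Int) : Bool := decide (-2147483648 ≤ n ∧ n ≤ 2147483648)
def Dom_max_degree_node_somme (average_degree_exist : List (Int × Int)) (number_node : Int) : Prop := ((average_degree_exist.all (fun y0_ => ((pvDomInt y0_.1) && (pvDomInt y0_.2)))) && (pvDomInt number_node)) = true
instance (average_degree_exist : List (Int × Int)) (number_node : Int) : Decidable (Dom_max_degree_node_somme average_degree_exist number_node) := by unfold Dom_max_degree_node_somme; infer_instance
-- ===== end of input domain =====

-- B groups pairs into a dict of buckets keyed by degree sum and emits the sums in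
-- descending order with each bucket reversed, instead of sorting the flat pair list;
-- a genuinely different pass of similar cost (objective: alternative).

-- ===== PORT A =====
-- A's two while loops (counters starting at 0 resp. comp+1, stepping by 1) are the
-- folds over the corresponding ranges; indexing is always in range, so pyGetD is exact.
def max_degree_node_somme (average_degree_exist : List (Int × Int)) (number_node : Int) : List ((Int × Int) × Int) :=
  let number_node :=
    if number_node > (average_degree_exist.length : Int) ∨ number_node = 0
      then (average_degree_exist.length : Int) else number_node
  let sum_node_degree :=
    (PySem.List.pyRange 0 number_node 1).foldl (fun acc comp =>
      let line := PySem.List.pyGetD average_degree_exist comp (0, 0)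
      let node1 := line.1
      let degree := line.2
      (PySem.List.pyRange (comp + 1) number_node 1).foldl (fun acc2 compte =>
        let line2 := PySem.List.pyGetD average_degree_exist compte (0, 0)
        let degree2 := line2.2
        let node2 := line2.1
        let sum := degree + degree2
        acc2 ++ [((node1, node2), sum)]) acc) []
  (PySem.List.sorted sum_node_degree (fun tup => tup.2)).reverse

-- ===== PORT B =====
-- buckets.setdefault(s, []).append(p) is exactly Dict.modify s [] (· ++ [p]).
def max_degree_node_somme_alt (average_degree_exist : List (Int × Int)) (number_node : Int) : List ((Int × Int) × Int) :=
  let n := (average_degree_exist.length : Int)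
  let number_node := if number_node > n ∨ number_node = 0 then n else number_node
  let buckets :=
    (PySem.List.pyRange 0 number_node 1).foldl (fun d comp =>
      let line := PySem.List.pyGetD average_degree_exist comp (0, 0)
      (PySem.List.pyRange (comp + 1) number_node 1).foldl (fun d2 compte =>
        let line2 := PySem.List.pyGetD average_degree_exist compte (0, 0)
        let s := line.2 + line2.2
        d2.modify s [] (fun l => l ++ [((line.1, line2.1), s)])) d)
      (PySem.Dict.empty)
  (PySem.List.sorted buckets.keys (fun x => x) true).foldl
    (fun out s => out ++ (buckets.getD s []).reverse) []

-- ===== PRECONDITION & SPEC =====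
def Spec_max_degree_node_somme (average_degree_exist : List (Int × Int)) (number_node : Int) (out : List ((Int × Int) × Int)) : Prop := out = max_degree_node_somme_alt average_degree_exist number_node
instance (average_degree_exist : List (Int × Int)) (number_node : Int) (out : List ((Int × Int) × Int)) : Decidable (Spec_max_degree_node_somme average_degree_exist number_node out) := by unfold Spec_max_degree_node_somme; infer_instance

-- ===== CLAIM (what is proved, stated in full; the proofs are below) =====
def Claim_equal_max_degree_node_somme : Prop := ∀ (average_degree_exist : List (Int × Int)) (number_node : Int), Dom_max_degree_node_somme average_degree_exist number_node → Spec_max_degree_node_somme average_degree_exist number_node (max_degree_node_somme average_degree_exist number_node)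

-- ===== LEMMAS AND PROOFS =====

theorem insertBy_cons {α : Type} (before : α → α → Bool) (x y : α) (ys : List α) :
    PySem.List.insertBy before x (y :: ys) =
      if before x y then x :: y :: ys else y :: PySem.List.insertBy before x ys := rfl

theorem insertBy_skip {α : Type} (before : α → α → Bool) (x : α) (l t : List α)
    (h : ∀ y ∈ l, before x y = false) :
    PySem.List.insertBy before x (l ++ t) = l ++ PySem.List.insertBy before x t := by
  induction l with
  | nil => simp
  | cons y ys ih =>
      simp [insertBy_cons, h y (by simp), ih (fun z hz => h z (by simp [hz]))]

theorem insertBy_front {α : Type} (before : α → α → Bool) (x : α) (l : List α)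
    (h : ∀ y ∈ l, before x y = true) :
    PySem.List.insertBy before x l = x :: l := by
  cases l with
  | nil => rfl
  | cons y ys => simp [insertBy_cons, h y (by simp)]

-- inserting x into a concatenation of key-homogeneous buckets over strictly
-- increasing keys appends x to its own bucket
theorem insertBy_flatMap {α : Type} (key : α → Int) (x : α) (ks : List Int) (g : Int → List α)
    (hks : ks.Pairwise (· < ·)) (hg : ∀ s ∈ ks, ∀ y ∈ g s, key y = s) (hx : key x ∈ ks) :
    PySem.List.insertBy (fun a b => decide (key a < key b)) x (ks.flatMap g)
      = ks.flatMap (fun s => if s = key x then g s ++ [x] else g s) := by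
  induction ks with
  | nil => simp at hx
  | cons k ks' ih =>
      rcases List.pairwise_cons.mp hks with ⟨hlt, hks'⟩
      simp only [List.flatMap_cons]
      rcases List.mem_cons.mp hx with hxk | hxk
      · -- key x = k : skip bucket k (keys equal), then insert in front of the rest
        rw [insertBy_skip _ _ _ _ (fun y hy => by
          simp [hg k (by simp) y hy, hxk])]
        rw [insertBy_front _ _ _ (fun y hy => by
          rcases List.mem_flatMap.mp hy with ⟨s, hs, hys⟩
          simp [hg s (by simp [hs]) y hys, hxk, hlt s hs])]
        have hrest : (ks'.flatMap fun s => if s = key x then g s ++ [x] else g s)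
            = ks'.flatMap g := by
          refine List.flatMap_congr ?_
          intro s hs
          have := hlt s hs
          rw [if_neg (by omega)]
        rw [if_pos hxk.symm, hrest]
        simp
      · -- key x in the tail: skip bucket k (k < key x), recurse
        have hklt : k < key x := hlt _ hxk
        rw [insertBy_skip _ _ _ _ (fun y hy => by
          have := hg k (by simp) y hy
          simp [this]; omega)]
        rw [ih hks' (fun s hs y hy => hg s (by simp [hs]) y hy) hxk]
        rw [if_neg (by omega)]

-- the stable ascending sort IS the concatenation of the original-order buckets
-- taken along any strictly increasing key list covering all keys
theorem sorted_eq_flatMap_buckets {α : Type} (key : α → Int) (L : List α) (ks : List Int)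
    (hks : ks.Pairwise (· < ·)) (hmem : ∀ x ∈ L, key x ∈ ks) :
    PySem.List.sorted L key = ks.flatMap (fun s => L.filter (fun x => key x == s)) := by
  induction L using List.reverseRecOn with
  | nil =>
      have h0 : PySem.List.sorted ([] : List α) key = [] := by
        rw [PySem.List.sorted_eq_foldl_insertBy]; rfl
      simp [h0]
  | append_singleton L x ih =>
      have hmemL : ∀ y ∈ L, key y ∈ ks := fun y hy => hmem y (by simp [hy])
      have hx : key x ∈ ks := hmem x (by simp)
      rw [PySem.List.sorted_eq_foldl_insertBy, List.foldl_append, List.foldl_cons, List.foldl_nil,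
          ← PySem.List.sorted_eq_foldl_insertBy, ih hmemL]
      rw [insertBy_flatMap key x ks _ hks (fun s hs y hy => by
        have := List.of_mem_filter hy; simpa using this) hx]
      refine List.flatMap_congr ?_
      intro s hs
      by_cases hsx : s = key x
      · simp [hsx, List.filter_append]
      · simp [List.filter_append, hsx, Ne.symm hsx]

theorem sorted_rev_eq_reverse_sorted (xs : List Int) :
    PySem.List.sorted (PySem.Set.ofList xs) (fun x => x) true
      = (PySem.List.sorted (PySem.Set.ofList xs) (fun x => x)).reverse := by
  apply PySem.List.sorted_rev_eq_of_perm_of_pairwise_gt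
  · exact (List.reverse_perm _).trans (PySem.List.sorted_perm _ _ _)
  · exact List.pairwise_reverse.mpr (PySem.List.sorted_ofList_pairwise_lt xs)

-- a nested loop over rows and per-row columns is the plain loop over the flattened item list
theorem foldl_nested_eq_foldl_flatMap {α β γ σ : Type} (outer : List β) (inner : β → List γ)
    (f : β → γ → α) (g : σ → α → σ) (init : σ) :
    outer.foldl (fun s i => (inner i).foldl (fun s2 j => g s2 (f i j)) s) init
      = (outer.flatMap (fun i => (inner i).map (f i))).foldl g init := by
  simp [List.foldl_flatMap, List.foldl_map]

-- the whole back end of B — keys of the bucket dict sorted descending, buckets reversed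
-- and concatenated — is A's reversed stable sort
theorem buckets_desc_eq_reverse_sorted {α : Type} [DecidableEq α] (key : α → Int) (L : List α) :
    (PySem.List.sorted
        (L.foldl (fun d x => d.modify (key x) [] (fun l => l ++ [x])) PySem.Dict.empty).keys
        (fun x => x) true).foldl
      (fun out s => out ++
        ((L.foldl (fun d x => d.modify (key x) [] (fun l => l ++ [x])) PySem.Dict.empty).getD s []).reverse) []
      = (PySem.List.sorted L key).reverse := by
  have hkeys : (L.foldl (fun d x => d.modify (key x) [] (fun l => l ++ [x]))
      (PySem.Dict.empty : PySem.Dict Int (List α))).keys = PySem.Set.ofList (L.map key) := by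
    have h := PySem.Dict.keys_foldl_modify_key L key [] (fun _ x l => l ++ [x]) PySem.Dict.empty
    simpa [PySem.Set.update_nil_left] using h
  have hgetD : ∀ s, (L.foldl (fun d x => d.modify (key x) [] (fun l => l ++ [x]))
      (PySem.Dict.empty : PySem.Dict Int (List α))).getD s [] = L.filter (fun x => key x == s) := by
    intro s
    have hmapfold : L.foldl (fun d x => d.modify (key x) [] (fun l => l ++ [x]))
        (PySem.Dict.empty : PySem.Dict Int (List α))
        = (L.map (fun x => (key x, x))).foldl (fun d p => d.modify p.1 [] (fun l => l ++ [p.2]))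
            PySem.Dict.empty := by rw [List.foldl_map]
    rw [hmapfold, PySem.Dict.getD_foldl_modify_append]
    simp [List.filter_map, Function.comp_def]
  set ks := PySem.List.sorted (PySem.Set.ofList (L.map key)) (fun x => x) with hksdef
  have hsortL : PySem.List.sorted L key
      = ks.flatMap (fun s => L.filter (fun x => key x == s)) := by
    refine sorted_eq_flatMap_buckets key L ks (PySem.List.sorted_ofList_pairwise_lt _) ?_
    intro x hx
    rw [hksdef, PySem.List.mem_sorted, PySem.Set.mem_ofList]
    exact List.mem_map_of_mem hx
  rw [hkeys, sorted_rev_eq_reverse_sorted, ← hksdef]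
  rw [PySem.List.foldl_append_eq_flatMap]
  simp only [hgetD, hsortL, List.reverse_flatMap, Function.comp_def, List.nil_append]

-- ===== VERDICT (by name: the statement is the Claim_ definition above) =====
theorem max_degree_node_somme_spec : Claim_equal_max_degree_node_somme := by
  intro xs nnode _hdom
  unfold Spec_max_degree_node_somme
  simp only [max_degree_node_somme, max_degree_node_somme_alt]
  set nn := if nnode > (xs.length : Int) ∨ nnode = 0 then (xs.length : Int) else nnode with hnn
  rw [foldl_nested_eq_foldl_flatMap (g := fun (acc2 : List ((Int × Int) × Int)) x => acc2 ++ [x])]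
  set L := ((PySem.List.pyRange 0 nn 1).flatMap fun comp =>
      (PySem.List.pyRange (comp + 1) nn 1).map fun compte =>
        (((PySem.List.pyGetD xs comp (0, 0)).1, (PySem.List.pyGetD xs compte (0, 0)).1),
          (PySem.List.pyGetD xs comp (0, 0)).2 + (PySem.List.pyGetD xs compte (0, 0)).2)) with hL
  have hB : List.foldl
      (fun d comp =>
        List.foldl
          (fun d2 compte =>
            d2.modify ((PySem.List.pyGetD xs comp (0, 0)).2 + (PySem.List.pyGetD xs compte (0, 0)).2) []
              fun l =>
                l ++ [(((PySem.List.pyGetD xs comp (0, 0)).1, (PySem.List.pyGetD xs compte (0, 0)).1),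
                    (PySem.List.pyGetD xs comp (0, 0)).2 + (PySem.List.pyGetD xs compte (0, 0)).2)])
          d (PySem.List.pyRange (comp + 1) nn 1))
      PySem.Dict.empty (PySem.List.pyRange 0 nn 1)
      = L.foldl (fun d x => d.modify x.2 [] (fun l => l ++ [x])) PySem.Dict.empty := by
    rw [hL]
    exact foldl_nested_eq_foldl_flatMap (PySem.List.pyRange 0 nn 1)
      (fun comp => PySem.List.pyRange (comp + 1) nn 1)
      (fun comp compte =>
        (((PySem.List.pyGetD xs comp (0, 0)).1, (PySem.List.pyGetD xs compte (0, 0)).1),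
          (PySem.List.pyGetD xs comp (0, 0)).2 + (PySem.List.pyGetD xs compte (0, 0)).2))
      (fun d x => d.modify x.2 [] (fun l => l ++ [x])) PySem.Dict.empty
  rw [hB]
  rw [show L.foldl (fun acc x => acc ++ [x]) [] = L from by
    simpa using PySem.List.foldl_append_singleton L [] ]
  exact (buckets_desc_eq_reverse_sorted (fun t => t.2) L).symm
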